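-- pv_equiv track=rewrite | github.com/XanaduAI/strawberryfields | strawberryfields/tdm/tdmprogram.py | _get_mode_order
-- ===== SOURCE A (Python) =====
-- from math import ceil
--
-- def _get_mode_order(num_of_values, modes, N, timebins):
--     """Get the order in which the modes were measured.
--
--     The mode order is determined by the circuit and the mode-shifting occurring in
--     :class:`~.TDMProgram`. For the following circuit, the mode order returned by this
--     function would be ``[0, 2, 0, 1]``, duplicated shots number of times:
--
--     >>> prog = sf.TDMProgram(N = [1, 2])
--
--     >>> with prog.context([1, 2], [4, 5]) as (p, q):
--     ...     MeasureHomodyne(p[0]) | q[0]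
--     ...     MeasureHomodyne(p[1]) | q[2]
--
--     """
--     all_modes = []
--     for i in range(len(N)):
--         timebin_modes = list(range(sum(N[:i]), sum(N[: i + 1])))
--         # shift the timebin_modes if the measured mode isn't the first in the
--         # band, so that the measurements start at the correct mode
--         shift = modes[i] - sum(N[:i])
--         timebin_modes = timebin_modes[shift:] + timebin_modes[:shift]
--
--         # extend the modes by duplicating the list so that the measured mode
--         # orders in all bands have the same length
--         extended_modes = timebin_modes * ceil(1 + timebins // len(timebin_modes))
--         all_modes.append(extended_modes[:timebins])
--
--     # alternate measurements in the bands and extend/duplicate the resulting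
--     # list so that it is at least as long as `num_of_values`
--     mode_order = [i for j in zip(*all_modes) for i in j]
--     mode_order *= ceil(1 + num_of_values / len(mode_order))
--
--     return mode_order[:num_of_values]
-- ===== SOURCE B (Python) =====
-- def _get_mode_order(num_of_values, modes, N, timebins):
--     """Compute each value directly by index arithmetic over one period
--     instead of building duplicated/interleaved/repeated lists.
--     For negative num_of_values this returns [] (the intended empty order)."""
--     nbands = len(N)
--     rot = []
--     off = 0
--     for b in range(nbands):
--         base = list(range(off, off + N[b]))
--         shift = modes[b] - off
--         rot.append(base[shift:] + base[:shift])
--         off += N[b]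
--     out = []
--     for k in range(num_of_values):
--         t = (k // nbands) % timebins
--         b = k % nbands
--         out.append(rot[b][t % N[b]])
--     return out
-- ===== Notes on version B (the rewrite author's own statement) =====
-- stated objective: alternative
-- what changed: B computes each output value directly by index arithmetic (k -> band k%len(N), timestep (k//len(N))%timebins, entry of the band's rotated base list) instead of A's pipeline of extend-by-duplication, zip-interleave and repeat-then-truncate lists.
-- intended difference: For num_of_values strictly between -(timebins*len(N)) and 0, A returns a nonempty tail-truncated period (an artefact of Python's negative-slice mode_order[:num_of_values]) while B returns [], the intended order of zero measured values. — e.g. on _get_mode_order(-1, [0, 1], [1, 2], 2): A returns [0, 1, 0], B returns []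
import Mathlib
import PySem

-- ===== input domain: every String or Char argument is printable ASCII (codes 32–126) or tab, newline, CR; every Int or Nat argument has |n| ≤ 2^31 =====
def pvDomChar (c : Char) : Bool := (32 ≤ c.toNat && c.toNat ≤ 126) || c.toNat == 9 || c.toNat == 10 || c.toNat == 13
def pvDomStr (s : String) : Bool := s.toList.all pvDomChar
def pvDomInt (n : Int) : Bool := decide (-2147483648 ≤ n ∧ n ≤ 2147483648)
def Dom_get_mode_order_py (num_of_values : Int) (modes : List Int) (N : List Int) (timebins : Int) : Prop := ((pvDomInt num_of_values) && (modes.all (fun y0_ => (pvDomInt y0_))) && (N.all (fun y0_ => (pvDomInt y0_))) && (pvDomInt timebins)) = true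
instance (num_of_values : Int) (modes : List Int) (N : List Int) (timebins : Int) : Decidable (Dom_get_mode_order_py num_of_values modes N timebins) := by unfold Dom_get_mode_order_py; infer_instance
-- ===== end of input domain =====

-- B computes each output value directly by index arithmetic over one measurement period instead of
-- A's extend-by-duplication / zip-interleave / repeat-then-truncate list pipeline (objective:
-- alternative algorithm, similar cost); on -(timebins*len(N)) < num_of_values < 0 the two differ
-- (see D_ below).

-- ===== PORT A =====
-- zip(*ls) flattened by the comprehension [i for j in zip(*ls) for i in j]: exact — zip truncates
-- to the minimum list length, and zip() of no lists is empty.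
def pyZipStarFlat (ls : List (List Int)) : List Int :=
  let m := ((ls.map List.length).min?).getD 0
  (List.range m).flatMap (fun t => ls.map (fun l => l.getD t 0))

-- 'ceil(1 + timebins // n)' on ints equals '1 + timebins // n'; 'ceil(1 + num/len)' (float true
-- division) is ported as the exact ceiling 1 + -((-num) // len), which is what Python computes for
-- every list length that is realizable in memory.
def get_mode_order_py (num_of_values : Int) (modes : List Int) (N : List Int) (timebins : Int) : List Int :=
  let all_modes := (PySem.List.pyRange 0 (N.length : Int) 1).foldl (fun acc i =>
    let lo := (PySem.List.slice N none (some i)).sum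
    let hi := (PySem.List.slice N none (some (i + 1))).sum
    let tm := PySem.List.pyRange lo hi 1
    let shift := PySem.List.pyGetD modes i 0 - lo
    let tm2 := PySem.List.slice tm (some shift) none ++ PySem.List.slice tm none (some shift)
    let ext := PySem.List.pyRepeat tm2 (1 + PySem.Int.floordiv timebins (tm2.length : Int))
    acc ++ [PySem.List.slice ext none (some timebins)]) []
  let mode_order := pyZipStarFlat all_modes
  let reps := 1 + -(PySem.Int.floordiv (-num_of_values) (mode_order.length : Int))
  PySem.List.slice (PySem.List.pyRepeat mode_order reps) none (some num_of_values)

-- ===== PORT B =====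
def get_mode_order_py_alt (num_of_values : Int) (modes : List Int) (N : List Int) (timebins : Int) : List Int :=
  let nb := (N.length : Int)
  let rot := ((PySem.List.pyRange 0 nb 1).foldl (fun (st : Int × List (List Int)) b =>
      let base := PySem.List.pyRange st.1 (st.1 + PySem.List.pyGetD N b 0) 1
      let shift := PySem.List.pyGetD modes b 0 - st.1
      (st.1 + PySem.List.pyGetD N b 0,
       st.2 ++ [PySem.List.slice base (some shift) none ++ PySem.List.slice base none (some shift)]))
    ((0 : Int), ([] : List (List Int)))).2
  (PySem.List.pyRange 0 num_of_values 1).map (fun k =>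
    let t := PySem.Int.mod (PySem.Int.floordiv k nb) timebins
    let b := PySem.Int.mod k nb
    PySem.List.pyGetD (PySem.List.pyGetD rot b []) (PySem.Int.mod t (PySem.List.pyGetD N b 0)) 0)

-- ===== PRECONDITION & SPEC =====
-- Exactly the inputs on which the Python A returns: elsewhere it raises (ZeroDivisionError when a
-- band is empty (some N[i] ≤ 0), when N = [] or when timebins ≤ 0; IndexError when modes is
-- shorter than N).
def Pre_get_mode_order_py (num_of_values : Int) (modes : List Int) (N : List Int) (timebins : Int) : Prop :=
  N ≠ [] ∧ (∀ x ∈ N, 0 < x) ∧ N.length ≤ modes.length ∧ 1 ≤ timebins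
instance (num_of_values : Int) (modes : List Int) (N : List Int) (timebins : Int) : Decidable (Pre_get_mode_order_py num_of_values modes N timebins) := by unfold Pre_get_mode_order_py; infer_instance

def pvWitness_get_mode_order_py : Int × List Int × List Int × Int := (4, [0, 2], [1, 2], 2)

-- For -(timebins*len(N)) < num_of_values < 0, A returns a nonempty tail-truncated period (an
-- artefact of Python's negative slice mode_order[:num_of_values]) while B returns [], the intended
-- order of zero measured values.
def D_get_mode_order_py (num_of_values : Int) (modes : List Int) (N : List Int) (timebins : Int) : Prop :=
  num_of_values < 0 ∧ -(timebins * (N.length : Int)) < num_of_values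
instance (num_of_values : Int) (modes : List Int) (N : List Int) (timebins : Int) : Decidable (D_get_mode_order_py num_of_values modes N timebins) := by unfold D_get_mode_order_py; infer_instance

def Spec_get_mode_order_py (num_of_values : Int) (modes : List Int) (N : List Int) (timebins : Int) (out : List Int) : Prop := ¬ D_get_mode_order_py num_of_values modes N timebins → out = get_mode_order_py_alt num_of_values modes N timebins
instance (num_of_values : Int) (modes : List Int) (N : List Int) (timebins : Int) (out : List Int) : Decidable (Spec_get_mode_order_py num_of_values modes N timebins out) := by unfold Spec_get_mode_order_py; infer_instance

def pvDiffWitness_get_mode_order_py : Int × List Int × List Int × Int := (-1, [0, 1], [1, 2], 2)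
def pvDiffWitnessOut_get_mode_order_py : (List Int) × (List Int) := ([0, 1, 0], [])

-- ===== CLAIM (what is proved, stated in full; the proofs are below) =====
def Claim_unchanged_get_mode_order_py : Prop := ∀ (num_of_values : Int) (modes : List Int) (N : List Int) (timebins : Int), Dom_get_mode_order_py num_of_values modes N timebins → Pre_get_mode_order_py num_of_values modes N timebins → Spec_get_mode_order_py num_of_values modes N timebins (get_mode_order_py num_of_values modes N timebins)
def Claim_changed_get_mode_order_py : Prop := Dom_get_mode_order_py (pvDiffWitness_get_mode_order_py.1) (pvDiffWitness_get_mode_order_py.2.1) (pvDiffWitness_get_mode_order_py.2.2.1) (pvDiffWitness_get_mode_order_py.2.2.2) ∧ Pre_get_mode_order_py (pvDiffWitness_get_mode_order_py.1) (pvDiffWitness_get_mode_order_py.2.1) (pvDiffWitness_get_mode_order_py.2.2.1) (pvDiffWitness_get_mode_order_py.2.2.2) ∧ D_get_mode_order_py (pvDiffWitness_get_mode_order_py.1) (pvDiffWitness_get_mode_order_py.2.1) (pvDiffWitness_get_mode_order_py.2.2.1) (pvDiffWitness_get_mode_order_py.2.2.2) ∧ get_mode_order_py (pvDiffWitness_get_mode_order_py.1)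 (pvDiffWitness_get_mode_order_py.2.1) (pvDiffWitness_get_mode_order_py.2.2.1) (pvDiffWitness_get_mode_order_py.2.2.2) = pvDiffWitnessOut_get_mode_order_py.1 ∧ get_mode_order_py_alt (pvDiffWitness_get_mode_order_py.1) (pvDiffWitness_get_mode_order_py.2.1) (pvDiffWitness_get_mode_order_py.2.2.1) (pvDiffWitness_get_mode_order_py.2.2.2) = pvDiffWitnessOut_get_mode_order_py.2 ∧ pvDiffWitnessOut_get_mode_order_py.1 ≠ pvDiffWitnessOut_get_mode_order_py.2
def Claim_exact_get_mode_order_py : Prop := ∀ (num_of_values : Int) (modes : List Int) (N : List Int) (timebins : Int), Dom_get_mode_order_py num_of_values modes N timebins → Pre_get_mode_order_py num_of_values modes N timebins → D_get_mode_order_py num_of_values modes N timebins → get_mode_order_py num_of_values modes N timebins ≠ get_mode_order_py_alt num_of_values modes N timebins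

-- ===== LEMMAS AND PROOFS =====

def rotb (modes N : List Int) (b : Nat) : List Int :=
  let off := ((N.take b).sum : Int)
  let base := PySem.List.pyRange off (off + N.getD b 0) 1
  let sh := modes.getD b 0 - off
  PySem.List.slice base (some sh) none ++ PySem.List.slice base none (some sh)

theorem take_sum_succ (N : List Int) (s : Nat) :
    (N.take (s + 1)).sum = (N.take s).sum + N.getD s 0 := by
  simp [List.take_add_one, List.getD_eq_getElem?_getD]
  cases h : N[s]? <;> simp

theorem rot_fold_general (modes N : List Int) (m : Nat) :
    ∀ (s : Nat) (acc : List (List Int)),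
    ((List.range' s m).foldl (fun (st : Int × List (List Int)) (b : Nat) =>
      (st.1 + N.getD b 0,
       st.2 ++ [PySem.List.slice (PySem.List.pyRange st.1 (st.1 + N.getD b 0) 1) (some (modes.getD b 0 - st.1)) none
             ++ PySem.List.slice (PySem.List.pyRange st.1 (st.1 + N.getD b 0) 1) none (some (modes.getD b 0 - st.1))]))
      (((N.take s).sum : Int), acc)).2 = acc ++ (List.range' s m).map (rotb modes N) := by
  induction m with
  | zero => intro s acc; simp
  | succ k ih =>
    intro s acc
    rw [List.range'_succ, List.foldl_cons, List.map_cons]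
    have h1 : ((N.take s).sum + N.getD s 0 : Int) = ((N.take (s+1)).sum : Int) := (take_sum_succ N s).symm
    conv_lhs => rw [h1]
    rw [ih (s+1)]
    simp [rotb, ← h1]

theorem rotb_length (modes N : List Int) (b : Nat) :
    (rotb modes N b).length = (N.getD b 0).toNat := by
  have hbase : (PySem.List.pyRange ((N.take b).sum : Int) ((N.take b).sum + N.getD b 0) 1).length = (N.getD b 0).toNat := by
    rw [PySem.List.length_pyRange_one]; congr 1; ring
  have hc := PySem.List.clampIdx_le (PySem.List.pyRange ((N.take b).sum : Int) ((N.take b).sum + N.getD b 0) 1).length (modes.getD b 0 - (N.take b).sum)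
  simp only [rotb, List.length_append, PySem.List.slice_some_none, List.length_drop]
  rw [← PySem.List.slice_zero_start, PySem.List.length_slice]
  have h0 : PySem.List.clampIdx (PySem.List.pyRange ((N.take b).sum : Int) ((N.take b).sum + N.getD b 0) 1).length 0 = 0 := by
    have h := PySem.List.clampIdx_natCast (PySem.List.pyRange ((N.take b).sum : Int) ((N.take b).sum + N.getD b 0) 1).length 0
    rw [show ((0:Nat):Int) = (0:Int) from rfl] at h
    rw [h]
    exact Nat.zero_min _
  rw [h0] at *
  omega

theorem flat_rep_get (m : Nat) (xs : List Int) (t : Nat) (hx : xs ≠ []) (ht : t < m * xs.length) :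
    ((List.replicate m xs).flatten)[t]? = xs[t % xs.length]? := by
  induction m generalizing t with
  | zero => omega
  | succ k ih =>
    rw [List.replicate_succ, List.flatten_cons]
    by_cases h : t < xs.length
    · rw [List.getElem?_append_left h, Nat.mod_eq_of_lt h]
    · have hlen : 0 < xs.length := List.length_pos_iff.mpr hx
      rw [Nat.succ_mul] at ht
      rw [List.getElem?_append_right (by omega),
          Nat.mod_eq_sub_mod (show xs.length ≤ t by omega)]
      exact ih (t - xs.length) (by omega)

def extb (modes N : List Int) (timebins : Int) (b : Nat) : List Int :=
  PySem.List.slice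
    (PySem.List.pyRepeat (rotb modes N b)
      (1 + PySem.Int.floordiv timebins ((rotb modes N b).length : Int)))
    none (some timebins)

theorem pyRepeat_eq_flatten (xs : List Int) (n : Int) :
    PySem.List.pyRepeat xs n = (List.replicate n.toNat xs).flatten := rfl

theorem length_flatten_replicate (m : Nat) (xs : List Int) :
    ((List.replicate m xs).flatten).length = m * xs.length := by
  simp [List.length_flatten]

theorem ext_bound (timebins : Int) (n : Nat) (hn : 0 < n) (ht : 1 ≤ timebins) :
    timebins.toNat ≤ (1 + PySem.Int.floordiv timebins (n : Int)).toNat * n := by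
  have hq := PySem.Int.floordiv_mul_add_mod timebins (n : Int)
  have hm0 := PySem.Int.mod_nonneg timebins (show (0:Int) < (n:Int) by exact_mod_cast hn)
  have hm1 := PySem.Int.mod_lt timebins (show (0:Int) < (n:Int) by exact_mod_cast hn)
  set q := PySem.Int.floordiv timebins (n : Int) with hqdef
  have hq0 : 0 ≤ q := by
    rw [hqdef]
    exact (PySem.Int.le_floordiv_iff_mul_le (show (0:Int) < (n:Int) by exact_mod_cast hn)).mpr (by omega)
  have hcast : (((1 + q).toNat * n : Nat) : Int) = (1 + q) * (n : Int) := by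
    push_cast [Int.toNat_of_nonneg (by omega : (0:Int) ≤ 1 + q)]
    ring
  have hexp : (1 + q) * (n : Int) = (n : Int) + q * (n : Int) := by ring
  omega

theorem extb_length (modes N : List Int) (timebins : Int) (b : Nat)
    (hb : 0 < N.getD b 0) (ht : 1 ≤ timebins) :
    (extb modes N timebins b).length = timebins.toNat := by
  have hn : 0 < (N.getD b 0).toNat := by omega
  have hlen : (rotb modes N b).length = (N.getD b 0).toNat := rotb_length modes N b
  rw [extb, PySem.List.slice_to _ (by omega : (0:Int) ≤ timebins), pyRepeat_eq_flatten,
      List.length_take, length_flatten_replicate, hlen]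
  have := ext_bound timebins (N.getD b 0).toNat hn ht
  omega

theorem extb_get (modes N : List Int) (timebins : Int) (b : Nat)
    (hb : 0 < N.getD b 0) (ht : 1 ≤ timebins) (t : Nat) (htt : t < timebins.toNat) :
    (extb modes N timebins b)[t]? = (rotb modes N b)[t % (N.getD b 0).toNat]? := by
  have hn : 0 < (N.getD b 0).toNat := by omega
  have hlen : (rotb modes N b).length = (N.getD b 0).toNat := rotb_length modes N b
  have hne : rotb modes N b ≠ [] :=
    List.ne_nil_of_length_pos (by rw [hlen]; exact hn)
  rw [extb, PySem.List.slice_to _ (by omega : (0:Int) ≤ timebins), pyRepeat_eq_flatten]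
  have hbound : t < (1 + PySem.Int.floordiv timebins ((rotb modes N b).length : Int)).toNat * (rotb modes N b).length := by
    rw [hlen]
    exact lt_of_lt_of_le htt (ext_bound timebins (N.getD b 0).toNat hn ht)
  rw [List.getElem?_take_of_lt htt, flat_rep_get _ _ _ hne hbound, hlen]

theorem min?_replicate_succ (m : Nat) (a : Nat) :
    (List.replicate (m + 1) a).min? = some a := by
  induction m with
  | zero => rfl
  | succ k ih => rw [List.replicate_succ, List.min?_cons, ih]; simp

theorem flatMap_const_get (g : Nat → List Int) (c : Nat) (hg : ∀ t, (g t).length = c)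
    (m j : Nat) (hj : j < m * c) :
    ((List.range m).flatMap g)[j]? = (g (j / c))[j % c]? := by
  induction m generalizing j with
  | zero => omega
  | succ k ih =>
    have hsum : (List.map (fun a => (g a).length) (List.range k)).sum = k * c := by
      simp [hg, Nat.mul_comm]
    rw [List.range_succ, List.flatMap_append]
    by_cases h : j < k * c
    · rw [List.getElem?_append_left (by rw [List.length_flatMap, hsum]; exact h)]
      exact ih j h
    · have hc : 0 < c := by rw [Nat.succ_mul] at hj; by_contra hc; omega
      rw [List.getElem?_append_right (by rw [List.length_flatMap, hsum]; omega)]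
      simp only [List.flatMap_cons, List.flatMap_nil, List.append_nil, List.length_flatMap]
      rw [hsum]
      have hj' : j < k * c + c := by rw [Nat.succ_mul] at hj; exact hj
      have h1 : j / c = k := Nat.div_eq_of_lt_le (by omega) (by rw [Nat.succ_mul]; omega)
      have h2 : j % c = j - k * c := by
        conv_lhs => rw [show j = (j - k*c) + k*c by omega]
        rw [Nat.add_mul_mod_self_right, Nat.mod_eq_of_lt (by omega)]
      rw [h1, h2]

theorem mo_length_lens (modes N : List Int) (timebins : Int)
    (hpos : ∀ b < N.length, 0 < N.getD b 0) (ht : 1 ≤ timebins) :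
    (((List.range N.length).map (extb modes N timebins)).map List.length)
      = List.replicate N.length timebins.toNat := by
  rw [List.map_map, List.eq_replicate_iff]
  refine ⟨by simp, ?_⟩
  intro x hx
  obtain ⟨b, hb, rfl⟩ := List.mem_map.mp hx
  exact extb_length modes N timebins b (hpos b (List.mem_range.mp hb)) ht

theorem mo_eq (modes N : List Int) (timebins : Int)
    (hN : N ≠ []) (hpos : ∀ b < N.length, 0 < N.getD b 0) (ht : 1 ≤ timebins) :
    pyZipStarFlat ((List.range N.length).map (extb modes N timebins))
      = (List.range timebins.toNat).flatMap
          (fun t => ((List.range N.length).map (extb modes N timebins)).map (fun l => l.getD t 0)) := by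
  have h1 := mo_length_lens modes N timebins hpos ht
  rw [pyZipStarFlat]
  obtain ⟨n, hn⟩ : ∃ n, N.length = n + 1 :=
    ⟨N.length - 1, by have := List.length_pos_iff.mpr hN; omega⟩
  rw [h1, hn, min?_replicate_succ]
  rfl

theorem mo_length (modes N : List Int) (timebins : Int)
    (hN : N ≠ []) (hpos : ∀ b < N.length, 0 < N.getD b 0) (ht : 1 ≤ timebins) :
    (pyZipStarFlat ((List.range N.length).map (extb modes N timebins))).length
      = timebins.toNat * N.length := by
  rw [mo_eq modes N timebins hN hpos ht, List.length_flatMap]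
  simp

theorem mo_get (modes N : List Int) (timebins : Int)
    (hN : N ≠ []) (hpos : ∀ b < N.length, 0 < N.getD b 0) (ht : 1 ≤ timebins)
    (j : Nat) (hj : j < timebins.toNat * N.length) :
    (pyZipStarFlat ((List.range N.length).map (extb modes N timebins)))[j]?
      = (rotb modes N (j % N.length))[(j / N.length) % (N.getD (j % N.length) 0).toNat]? := by
  have hnb : 0 < N.length := List.length_pos_iff.mpr hN
  rw [mo_eq modes N timebins hN hpos ht]
  rw [flatMap_const_get _ N.length (by intro t; simp) timebins.toNat j hj]
  have hb : j % N.length < N.length := Nat.mod_lt _ hnb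
  rw [List.getElem?_map, List.getElem?_map, List.getElem?_range hb]
  simp only [Option.map_some]
  have hbp := hpos _ hb
  have hdiv : j / N.length < timebins.toNat :=
    Nat.div_lt_of_lt_mul (by rw [Nat.mul_comm] at hj; exact hj)
  rw [← extb_get modes N timebins (j % N.length) hbp ht (j / N.length) hdiv]
  rw [List.getD_eq_getElem?_getD]
  cases hx : (extb modes N timebins (j % N.length))[j / N.length]? with
  | none =>
    exfalso
    rw [List.getElem?_eq_none_iff, extb_length modes N timebins _ hbp ht] at hx
    omega
  | some v => simp

theorem rot_eq (modes N : List Int) :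
    ((PySem.List.pyRange 0 (N.length : Int) 1).foldl (fun (st : Int × List (List Int)) b =>
      let base := PySem.List.pyRange st.1 (st.1 + PySem.List.pyGetD N b 0) 1
      let shift := PySem.List.pyGetD modes b 0 - st.1
      (st.1 + PySem.List.pyGetD N b 0,
       st.2 ++ [PySem.List.slice base (some shift) none ++ PySem.List.slice base none (some shift)]))
    ((0 : Int), ([] : List (List Int)))).2 = (List.range N.length).map (rotb modes N) := by
  rw [PySem.List.pyRange_zero_nat, List.foldl_map]
  have hfun : (fun (st : Int × List (List Int)) (b : Nat) =>
      (st.1 + PySem.List.pyGetD N (↑b) 0,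
       st.2 ++ [PySem.List.slice (PySem.List.pyRange st.1 (st.1 + PySem.List.pyGetD N (↑b) 0) 1) (some (PySem.List.pyGetD modes (↑b) 0 - st.1)) none
             ++ PySem.List.slice (PySem.List.pyRange st.1 (st.1 + PySem.List.pyGetD N (↑b) 0) 1) none (some (PySem.List.pyGetD modes (↑b) 0 - st.1))]))
      = (fun (st : Int × List (List Int)) (b : Nat) =>
      (st.1 + N.getD b 0,
       st.2 ++ [PySem.List.slice (PySem.List.pyRange st.1 (st.1 + N.getD b 0) 1) (some (modes.getD b 0 - st.1)) none
             ++ PySem.List.slice (PySem.List.pyRange st.1 (st.1 + N.getD b 0) 1) none (some (modes.getD b 0 - st.1))])) := by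
    funext st b
    simp only [PySem.List.pyGetD_natCast]
  rw [hfun, List.range_eq_range']
  simpa using rot_fold_general modes N N.length 0 []

theorem all_modes_eq (modes N : List Int) (timebins : Int) :
    ((PySem.List.pyRange 0 (N.length : Int) 1).foldl (fun acc i =>
      let lo := (PySem.List.slice N none (some i)).sum
      let hi := (PySem.List.slice N none (some (i + 1))).sum
      let tm := PySem.List.pyRange lo hi 1
      let shift := PySem.List.pyGetD modes i 0 - lo
      let tm2 := PySem.List.slice tm (some shift) none ++ PySem.List.slice tm none (some shift)
      let ext := PySem.List.pyRepeat tm2 (1 + PySem.Int.floordiv timebins (tm2.length : Int))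
      acc ++ [PySem.List.slice ext none (some timebins)]) ([] : List (List Int)))
    = (List.range N.length).map (extb modes N timebins) := by
  rw [PySem.List.pyRange_zero_nat, List.foldl_map]
  have hfun : ∀ (acc : List (List Int)) (i : Nat),
      (fun (acc : List (List Int)) (i : Int) =>
        let lo := (PySem.List.slice N none (some i)).sum
        let hi := (PySem.List.slice N none (some (i + 1))).sum
        let tm := PySem.List.pyRange lo hi 1
        let shift := PySem.List.pyGetD modes i 0 - lo
        let tm2 := PySem.List.slice tm (some shift) none ++ PySem.List.slice tm none (some shift)
        let ext := PySem.List.pyRepeat tm2 (1 + PySem.Int.floordiv timebins (tm2.length : Int))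
        acc ++ [PySem.List.slice ext none (some timebins)]) acc (↑i)
      = acc ++ [extb modes N timebins i] := by
    intro acc i
    simp only
    rw [show ((i:Int) + 1) = ((i+1 : Nat) : Int) by push_cast; ring]
    simp only [PySem.List.slice_to_natCast, PySem.List.pyGetD_natCast, take_sum_succ]
    simp only [extb, rotb]
  calc (List.range N.length).foldl _ [] = (List.range N.length).foldl (fun acc i => acc ++ [extb modes N timebins i]) [] := by
        apply PySem.List.foldl_congr_mem
        intro acc a _
        exact hfun acc a
    _ = (List.range N.length).map (extb modes N timebins) := by
        rw [PySem.List.foldl_append_singleton_eq_map]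
        simp

theorem rep_bound (num : Int) (L : Nat) (hL : 0 < L) (hnum : 0 ≤ num) :
    num.toNat ≤ (1 + -(PySem.Int.floordiv (-num) (L : Int))).toNat * L := by
  have hLpos : (0:Int) < (L:Int) := by exact_mod_cast hL
  have hq := PySem.Int.floordiv_mul_add_mod (-num) (L : Int)
  have hm0 := PySem.Int.mod_nonneg (-num) hLpos
  have hm1 := PySem.Int.mod_lt (-num) hLpos
  set q := PySem.Int.floordiv (-num) (L : Int) with hqdef
  have hqle : q ≤ 0 := by
    by_contra h
    have h1 : 1 ≤ q := by omega
    have := (PySem.Int.le_floordiv_iff_mul_le hLpos).mp (hqdef ▸ h1)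
    omega
  have hcast : (((1 + -q).toNat * L : Nat) : Int) = (1 + -q) * (L : Int) := by
    push_cast [Int.toNat_of_nonneg (by omega : (0:Int) ≤ 1 + -q)]
    ring
  have hexp : (1 + -q) * (L : Int) = (L : Int) - q * (L : Int) := by ring
  omega

theorem get_mode_order_spec' :
    ∀ (num_of_values : Int) (modes : List Int) (N : List Int) (timebins : Int),
    (N ≠ [] ∧ (∀ x ∈ N, 0 < x) ∧ N.length ≤ modes.length ∧ 1 ≤ timebins) →
    ¬ (num_of_values < 0 ∧ -(timebins * (N.length : Int)) < num_of_values) →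
    get_mode_order_py num_of_values modes N timebins = get_mode_order_py_alt num_of_values modes N timebins := by
  intro num modes N timebins ⟨hN, hposmem, hml, htb⟩ hD
  have hpos : ∀ b < N.length, 0 < N.getD b 0 := by
    intro b hb
    rw [List.getD_eq_getElem _ _ hb]
    exact hposmem _ (List.getElem_mem hb)
  have hnb : 0 < N.length := List.length_pos_iff.mpr hN
  have hT0 : 0 < timebins.toNat := by omega
  have hTcast : ((timebins.toNat : Nat) : Int) = timebins := Int.toNat_of_nonneg (by omega)
  have hL : 0 < timebins.toNat * N.length := Nat.mul_pos hT0 hnb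
  simp only [get_mode_order_py, get_mode_order_py_alt]
  rw [all_modes_eq, rot_eq,
      mo_length modes N timebins hN hpos htb]
  by_cases hnn : 0 ≤ num
  · -- main case: num_of_values ≥ 0
    rw [PySem.List.slice_to _ hnn, PySem.List.pyRange_zero, List.map_map]
    apply List.ext_getElem?
    intro k
    by_cases hk : k < num.toNat
    · rw [List.getElem?_take_of_lt hk, pyRepeat_eq_flatten,
          flat_rep_get _ _ _ (List.ne_nil_of_length_pos (by rw [mo_length modes N timebins hN hpos htb]; exact hL))
            (by rw [mo_length modes N timebins hN hpos htb]
                exact lt_of_lt_of_le hk (rep_bound num _ hL hnn)),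
          mo_length modes N timebins hN hpos htb,
          mo_get modes N timebins hN hpos htb _ (Nat.mod_lt _ hL)]
      have hjb : k % (timebins.toNat * N.length) % N.length = k % N.length :=
        Nat.mod_mod_of_dvd k (Dvd.intro_left _ rfl)
      have hjd : k % (timebins.toNat * N.length) / N.length = k / N.length % timebins.toNat := by
        rw [Nat.mul_comm, Nat.mod_mul_right_div_self]
      rw [hjb, hjd]
      -- right-hand side
      rw [List.getElem?_map, List.getElem?_range hk, Option.map_some]
      have hbmem : k % N.length < N.length := Nat.mod_lt _ hnb
      have hbp := hpos _ hbmem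
      have hNg : N.getD (k % N.length) 0 = (((N.getD (k % N.length) 0).toNat : Nat) : Int) :=
        (Int.toNat_of_nonneg (by omega)).symm
      simp only [Function.comp, PySem.Int.floordiv_natCast, PySem.Int.mod_natCast]
      rw [← hTcast, PySem.Int.mod_natCast, PySem.List.pyGetD_natCast, PySem.List.pyGetD_natCast]
      conv_rhs => rw [hNg]
      rw [PySem.Int.mod_natCast, PySem.List.pyGetD_natCast]
      have hrotg : (List.map (rotb modes N) (List.range N.length)).getD (k % N.length) [] = rotb modes N (k % N.length) := by
        rw [List.getD_eq_getElem?_getD, List.getElem?_map, List.getElem?_range hbmem]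
        rfl
      rw [hrotg]
      have hidx : k / N.length % timebins.toNat % (N.getD (k % N.length) 0).toNat < (rotb modes N (k % N.length)).length := by
        rw [rotb_length]
        exact Nat.mod_lt _ (by omega)
      simp only [Int.toNat_natCast]
      rw [List.getElem?_eq_getElem hidx]
      exact congrArg some (List.getD_eq_getElem _ _ hidx).symm
    · rw [List.getElem?_eq_none (by simp; omega),
          List.getElem?_eq_none (by simp; omega)]
  · -- num_of_values ≤ -(timebins * len(N)) : both sides empty
    have hle : num ≤ -(timebins * (N.length : Int)) := by
      rcases not_and_or.mp hD with h | h
      · omega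
      · omega
    have hq1 : 1 ≤ PySem.Int.floordiv (-num) ((timebins.toNat * N.length : Nat) : Int) := by
      apply (PySem.Int.le_floordiv_iff_mul_le (by exact_mod_cast hL)).mpr
      push_cast [hTcast]
      nlinarith [hle]
    have hR0 : (1 + -(PySem.Int.floordiv (-num) ((timebins.toNat * N.length : Nat) : Int))).toNat = 0 := by omega
    rw [pyRepeat_eq_flatten, hR0]
    simp only [List.replicate_zero, List.flatten_nil]
    have hm : 0 < (-num).toNat := by omega
    rw [show num = -(((-num).toNat : Nat) : Int) by omega,
        PySem.List.slice_to_neg_natCast _ _ hm]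
    rw [PySem.List.pyRange_one_eq_nil (by omega)]
    simp

theorem get_mode_order_tight :
    ∀ (num_of_values : Int) (modes : List Int) (N : List Int) (timebins : Int),
    (N ≠ [] ∧ (∀ x ∈ N, 0 < x) ∧ N.length ≤ modes.length ∧ 1 ≤ timebins) →
    (num_of_values < 0 ∧ -(timebins * (N.length : Int)) < num_of_values) →
    get_mode_order_py num_of_values modes N timebins ≠ get_mode_order_py_alt num_of_values modes N timebins := by
  intro num modes N timebins ⟨hN, hposmem, hml, htb⟩ ⟨hd1, hd2⟩
  have hpos : ∀ b < N.length, 0 < N.getD b 0 := by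
    intro b hb
    rw [List.getD_eq_getElem _ _ hb]
    exact hposmem _ (List.getElem_mem hb)
  have hnb : 0 < N.length := List.length_pos_iff.mpr hN
  have hT0 : 0 < timebins.toNat := by omega
  have hTcast : ((timebins.toNat : Nat) : Int) = timebins := Int.toNat_of_nonneg (by omega)
  have hL : 0 < timebins.toNat * N.length := Nat.mul_pos hT0 hnb
  have hmlt : (-num) < ((timebins.toNat * N.length : Nat) : Int) := by push_cast [hTcast]; nlinarith
  simp only [get_mode_order_py, get_mode_order_py_alt]
  rw [all_modes_eq, mo_length modes N timebins hN hpos htb]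
  have hq0 : PySem.Int.floordiv (-num) ((timebins.toNat * N.length : Nat) : Int) = 0 := by
    rw [PySem.Int.floordiv_eq_iff_of_pos (by exact_mod_cast hL)]
    constructor
    · omega
    · simpa using hmlt
  rw [hq0]
  have hone : ((1 + -0 : Int)).toNat = 1 := by norm_num
  rw [pyRepeat_eq_flatten, hone]
  have hflat : (List.replicate 1 (pyZipStarFlat ((List.range N.length).map (extb modes N timebins)))).flatten
      = pyZipStarFlat ((List.range N.length).map (extb modes N timebins)) := by simp
  rw [hflat]
  have hm : 0 < (-num).toNat := by omega
  rw [PySem.List.pyRange_one_eq_nil (show num ≤ (0:Int) by omega)]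
  rw [show num = -(((-num).toNat : Nat) : Int) by omega]
  rw [PySem.List.slice_to_neg_natCast _ _ hm]
  intro heq
  have hlen := congrArg List.length heq
  rw [List.length_take, mo_length modes N timebins hN hpos htb] at hlen
  simp at hlen
  omega

-- ===== VERDICT (by name: the statement is the Claim_ definition above) =====
theorem get_mode_order_py_spec : Claim_unchanged_get_mode_order_py := by
  intro num modes N timebins _ hPre hD
  exact get_mode_order_spec' num modes N timebins hPre hD

theorem get_mode_order_py_changed : Claim_changed_get_mode_order_py := by
  unfold Claim_changed_get_mode_order_py; decide

theorem get_mode_order_py_tight : Claim_exact_get_mode_order_py := by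
  intro num modes N timebins _ hPre hD
  exact get_mode_order_tight num modes N timebins hPre hD
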